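-- pv_equiv track=rewrite | github.com/nunores/FEUP-IART-15 | src/logic.py | move_bot_left
-- ===== SOURCE A (Python) =====
-- def move_bot_left(pieces, piece):
--     if (piece[0] == 1 or piece[1] == 1):
--         return piece
--     else:
--         if ((piece[0] - 1, piece[1] - 1) in pieces):
--             return piece
--         else:
--             return move_bot_left(pieces, (piece[0] - 1, piece[1] - 1))
-- ===== SOURCE B (Python) =====
-- def _slide_steps(pieces, x, y):
--     # number of diagonal steps: limited by whichever coordinate starts >= 1
--     # reaching 1, and by the nearest blocking piece on the same diagonal.
--     k = min(c - 1 for c in (x, y) if c >= 1)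
--     for qx, qy in pieces:
--         d = x - qx
--         if d == y - qy and d >= 1:
--             k = min(k, d - 1)
--     return k
--
-- def move_bot_left(pieces, piece):
--     x, y = piece
--     k = _slide_steps(pieces, x, y)
--     return piece if k == 0 else (x - k, y - k)
-- ===== Notes on version B (the rewrite author's own statement) =====
-- stated objective: faster
-- what changed: B replaces A's step-by-step recursive walk (each step scanning pieces for membership) with a closed form: one pass over pieces computes the minimum permitted step count along the diagonal, then the destination is computed directly.
-- outside the precondition, e.g. on move_bot_left({(-1, -1)}, (0, 0)): A returns (0, 0), B raises ValueError
import Mathlib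
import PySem

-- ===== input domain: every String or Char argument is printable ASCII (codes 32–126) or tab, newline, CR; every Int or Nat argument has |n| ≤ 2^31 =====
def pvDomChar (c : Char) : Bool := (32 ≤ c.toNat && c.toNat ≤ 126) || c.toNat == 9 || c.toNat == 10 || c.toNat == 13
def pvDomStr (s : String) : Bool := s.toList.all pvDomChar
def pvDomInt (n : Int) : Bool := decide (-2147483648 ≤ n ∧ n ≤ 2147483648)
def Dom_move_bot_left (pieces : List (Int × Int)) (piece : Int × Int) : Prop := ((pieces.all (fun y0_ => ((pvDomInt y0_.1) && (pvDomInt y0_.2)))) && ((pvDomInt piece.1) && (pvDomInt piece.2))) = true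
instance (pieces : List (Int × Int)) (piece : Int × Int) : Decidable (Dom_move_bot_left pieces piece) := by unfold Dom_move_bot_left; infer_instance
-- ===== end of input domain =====

-- B computes the slide destination in one pass over `pieces` (closed form for the
-- step count) instead of A's step-by-step recursive walk: one pass over pieces rather than one scan per step.


-- ===== PORT A =====
-- A's recursion, made total with a fuel counter (the fuel never runs out on
-- inputs satisfying Pre_move_bot_left; it only guards termination).
def moveBotLeftFuel (pieces : List (Int × Int)) : Nat → Int × Int → Int × Int
  | 0, p => p
  | n + 1, p =>
    if p.1 = 1 ∨ p.2 = 1 then p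
    else if (p.1 - 1, p.2 - 1) ∈ pieces then p
    else moveBotLeftFuel pieces n (p.1 - 1, p.2 - 1)

def move_bot_left (pieces : List (Int × Int)) (piece : Int × Int) : Int × Int :=
  moveBotLeftFuel pieces (piece.1.natAbs + piece.2.natAbs + 1) piece

-- ===== PORT B =====
-- `min` over the comprehension: on an empty candidate list Python raises
-- ValueError (both coordinates < 1, outside Pre_); the port uses getD 0 there.
def slideSteps (pieces : List (Int × Int)) (x y : Int) : Int :=
  let k0 := ((([x, y].filter (fun c => 1 ≤ c)).map (fun c => c - 1)).min?).getD 0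
  pieces.foldl (fun k q => if x - q.1 = y - q.2 ∧ 1 ≤ x - q.1 then min k (x - q.1 - 1) else k) k0

def move_bot_left_alt (pieces : List (Int × Int)) (piece : Int × Int) : Int × Int :=
  let x := piece.1
  let y := piece.2
  let k := slideSteps pieces x y
  if k = 0 then piece else (x - k, y - k)

-- ===== PRECONDITION & SPEC =====
-- Pre_ excludes pieces with both coordinates < 1 (off the 1-based board): there A
-- either recurses forever (RecursionError) or returns the input only via an
-- accidental block check, while B's min over an empty candidate list raises ValueError.
def Pre_move_bot_left (pieces : List (Int × Int)) (piece : Int × Int) : Prop :=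
  1 ≤ piece.1 ∨ 1 ≤ piece.2
instance (pieces : List (Int × Int)) (piece : Int × Int) : Decidable (Pre_move_bot_left pieces piece) := by unfold Pre_move_bot_left; infer_instance

def pvWitness_move_bot_left : (List (Int × Int)) × (Int × Int) := ([(3, 3)], (5, 5))

def Spec_move_bot_left (pieces : List (Int × Int)) (piece : Int × Int) (out : Int × Int) : Prop := out = move_bot_left_alt pieces piece
instance (pieces : List (Int × Int)) (piece : Int × Int) (out : Int × Int) : Decidable (Spec_move_bot_left pieces piece out) := by unfold Spec_move_bot_left; infer_instance

-- ===== CLAIM (what is proved, stated in full; the proofs are below) =====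
def Claim_equal_move_bot_left : Prop := ∀ (pieces : List (Int × Int)) (piece : Int × Int), Dom_move_bot_left pieces piece → Pre_move_bot_left pieces piece → Spec_move_bot_left pieces piece (move_bot_left pieces piece)

-- ===== LEMMAS AND PROOFS =====

-- the step-bound function used by B, written without the `let`s
theorem slideSteps_def (pieces : List (Int × Int)) (x y : Int) :
    slideSteps pieces x y =
      pieces.foldl (fun k q => if x - q.1 = y - q.2 ∧ 1 ≤ x - q.1 then min k (x - q.1 - 1) else k)
        (((([x, y].filter (fun c => 1 ≤ c)).map (fun c => c - 1)).min?).getD 0) := rfl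

-- initial bound k0, computed by cases on the two coordinates
theorem k0_cases (x y : Int) (h : 1 ≤ x ∨ 1 ≤ y) :
    (((([x, y].filter (fun c => 1 ≤ c)).map (fun c => c - 1)).min?).getD 0) =
      if 1 ≤ x then (if 1 ≤ y then min (x - 1) (y - 1) else x - 1)
      else y - 1 := by
  rcases h with h | h <;> by_cases hx : (1:Int) ≤ x <;> by_cases hy : (1:Int) ≤ y <;>
    simp [List.filter, List.min?, hx, hy] <;> omega

-- the fold only ever lowers the accumulator
theorem foldl_le (pieces : List (Int × Int)) (x y a : Int) :
    pieces.foldl (fun k q => if x - q.1 = y - q.2 ∧ 1 ≤ x - q.1 then min k (x - q.1 - 1) else k) a ≤ a := by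
  induction pieces generalizing a with
  | nil => simp
  | cons q l ih =>
    simp only [List.foldl_cons]
    split
    · exact le_trans (ih _) (min_le_left _ _)
    · exact ih _

-- the fold's result is either the start value or one of the blocker limits
theorem foldl_mem (pieces : List (Int × Int)) (x y a : Int) :
    pieces.foldl (fun k q => if x - q.1 = y - q.2 ∧ 1 ≤ x - q.1 then min k (x - q.1 - 1) else k) a = a ∨
      ∃ q ∈ pieces, (x - q.1 = y - q.2 ∧ 1 ≤ x - q.1) ∧
        pieces.foldl (fun k q => if x - q.1 = y - q.2 ∧ 1 ≤ x - q.1 then min k (x - q.1 - 1) else k) a = x - q.1 - 1 := by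
  induction pieces generalizing a with
  | nil => simp
  | cons q l ih =>
    simp only [List.foldl_cons]
    split
    · rename_i hq
      rcases ih (min a (x - q.1 - 1)) with h | ⟨r, hr, hc, he⟩
      · rcases min_cases a (x - q.1 - 1) with ⟨hm, _⟩ | ⟨hm, _⟩
        · left; rw [h, hm]
        · right; exact ⟨q, by simp, hq, by rw [h, hm]⟩
      · right; exact ⟨r, by simp [hr], hc, he⟩
    · rcases ih a with h | ⟨r, hr, hc, he⟩
      · left; exact h
      · right; exact ⟨r, by simp [hr], hc, he⟩

-- a blocker on the diagonal bounds the fold's result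
theorem foldl_le_blocker (pieces : List (Int × Int)) (x y a : Int) (q : Int × Int)
    (hq : q ∈ pieces) (hc : x - q.1 = y - q.2 ∧ 1 ≤ x - q.1) :
    pieces.foldl (fun k q => if x - q.1 = y - q.2 ∧ 1 ≤ x - q.1 then min k (x - q.1 - 1) else k) a ≤ x - q.1 - 1 := by
  induction pieces generalizing a with
  | nil => simp at hq
  | cons p l ih =>
    simp only [List.foldl_cons]
    rcases List.mem_cons.mp hq with rfl | hmem
    · rw [if_pos hc]
      exact le_trans (foldl_le l x y _) (min_le_right _ _)
    · split
      · exact ih _ hmem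
      · exact ih _ hmem

theorem slideSteps_nonneg (pieces : List (Int × Int)) (x y : Int) (h : 1 ≤ x ∨ 1 ≤ y) :
    0 ≤ slideSteps pieces x y := by
  rw [slideSteps_def, k0_cases x y h]
  rcases foldl_mem pieces x y _ with he | ⟨q, _, hc, he⟩
  · rw [he]; rcases h with h | h <;> by_cases hx : (1:Int) ≤ x <;> by_cases hy : (1:Int) ≤ y <;>
      simp [hx, hy] <;> omega
  · rw [he]; omega

theorem slideSteps_le_x (pieces : List (Int × Int)) (x y : Int) (hx : 1 ≤ x) :
    slideSteps pieces x y ≤ x - 1 := by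
  rw [slideSteps_def, k0_cases x y (Or.inl hx)]
  refine le_trans (foldl_le pieces x y _) ?_
  by_cases hy : (1:Int) ≤ y <;> simp [hx, hy]

theorem slideSteps_le_y (pieces : List (Int × Int)) (x y : Int) (hy : 1 ≤ y) :
    slideSteps pieces x y ≤ y - 1 := by
  rw [slideSteps_def, k0_cases x y (Or.inr hy)]
  refine le_trans (foldl_le pieces x y _) ?_
  by_cases hx : (1:Int) ≤ x <;> simp [hx, hy]

-- k = 0 exactly when A's stopping condition holds at (x, y)
theorem slideSteps_eq_zero_iff (pieces : List (Int × Int)) (x y : Int) (h : 1 ≤ x ∨ 1 ≤ y) :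
    slideSteps pieces x y = 0 ↔ (x = 1 ∨ y = 1 ∨ (x - 1, y - 1) ∈ pieces) := by
  constructor
  · intro h0
    rw [slideSteps_def, k0_cases x y h] at h0
    rcases foldl_mem pieces x y
        (if 1 ≤ x then (if 1 ≤ y then min (x - 1) (y - 1) else x - 1) else y - 1) with he | ⟨q, hq, hc, he⟩
    · rw [he] at h0
      rcases h with h | h <;> by_cases hx : (1:Int) ≤ x <;> by_cases hy : (1:Int) ≤ y <;>
        simp [hx, hy] at h0 <;> omega
    · rw [he] at h0
      have hq1 : x - q.1 = 1 := by omega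
      have : q = (x - 1, y - 1) := by
        have := hc.1
        ext <;> simp <;> omega
      exact Or.inr (Or.inr (this ▸ hq))
  · intro hstop
    have h0 : 0 ≤ slideSteps pieces x y := slideSteps_nonneg pieces x y h
    rcases hstop with h1 | h1 | h1
    · have := slideSteps_le_x pieces x y (by omega); omega
    · have := slideSteps_le_y pieces x y (by omega); omega
    · have := foldl_le_blocker pieces x y
        (((([x, y].filter (fun c => 1 ≤ c)).map (fun c => c - 1)).min?).getD 0)
        (x - 1, y - 1) h1 (by constructor <;> simp <;> omega)
      rw [slideSteps_def] at h0 ⊢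
      simp at this
      omega

-- shifting the whole walk one step down shifts the fold's result by one,
-- provided (x-1, y-1) itself is not a blocker
theorem foldl_shift (pieces : List (Int × Int)) (x y a : Int)
    (hnb : (x - 1, y - 1) ∉ pieces) :
    pieces.foldl (fun k q => if (x - 1) - q.1 = (y - 1) - q.2 ∧ 1 ≤ (x - 1) - q.1 then min k ((x - 1) - q.1 - 1) else k) (a - 1) =
      pieces.foldl (fun k q => if x - q.1 = y - q.2 ∧ 1 ≤ x - q.1 then min k (x - q.1 - 1) else k) a - 1 := by
  induction pieces generalizing a with
  | nil => simp
  | cons q l ih =>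
    have hq : q ≠ (x - 1, y - 1) := fun h => hnb (by simp [h])
    have hl : (x - 1, y - 1) ∉ l := fun h => hnb (by simp [h])
    simp only [List.foldl_cons]
    by_cases hc : x - q.1 = y - q.2 ∧ 1 ≤ x - q.1
    · have hne : x - q.1 ≠ 1 := by
        intro h1
        exact hq (by ext <;> simp <;> omega)
      have hc' : (x - 1) - q.1 = (y - 1) - q.2 ∧ 1 ≤ (x - 1) - q.1 := ⟨by omega, by omega⟩
      rw [if_pos hc, if_pos hc']
      have : min a (x - q.1 - 1) - 1 = min (a - 1) ((x - 1) - q.1 - 1) := by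
        rcases min_cases a (x - q.1 - 1) with ⟨h1, h2⟩ | ⟨h1, h2⟩ <;>
          rcases min_cases (a - 1) ((x - 1) - q.1 - 1) with ⟨h3, h4⟩ | ⟨h3, h4⟩ <;> omega
      rw [← this]
      exact ih _ hl
    · have hc' : ¬ ((x - 1) - q.1 = (y - 1) - q.2 ∧ 1 ≤ (x - 1) - q.1) := by
        intro ⟨h1, h2⟩; exact hc ⟨by omega, by omega⟩
      simp only [hc, hc', if_false]
      exact ih _ hl

theorem slideSteps_step (pieces : List (Int × Int)) (x y : Int) (h : 1 ≤ x ∨ 1 ≤ y)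
    (hx : x ≠ 1) (hy : y ≠ 1) (hnb : (x - 1, y - 1) ∉ pieces) :
    slideSteps pieces (x - 1) (y - 1) = slideSteps pieces x y - 1 := by
  have hx2 : 1 ≤ x → 2 ≤ x := by omega
  have hy2 : 1 ≤ y → 2 ≤ y := by omega
  rw [slideSteps_def, slideSteps_def, k0_cases x y h,
      k0_cases (x - 1) (y - 1) (by omega)]
  have hk0 : (if 1 ≤ x - 1 then (if 1 ≤ y - 1 then min (x - 1 - 1) (y - 1 - 1) else x - 1 - 1) else y - 1 - 1) =
      (if 1 ≤ x then (if 1 ≤ y then min (x - 1) (y - 1) else x - 1) else y - 1) - 1 := by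
    by_cases hx1 : (1:Int) ≤ x <;> by_cases hy1 : (1:Int) ≤ y <;>
      simp [hx1, hy1] <;>
      first
        | (rw [if_pos (by omega), if_pos (by omega)]
           rcases min_cases (x - 1 - 1) (y - 1 - 1) with ⟨h1, h2⟩ | ⟨h1, h2⟩ <;>
             rcases min_cases (x - 1) (y - 1) with ⟨h3, h4⟩ | ⟨h3, h4⟩ <;> omega)
        | (rw [if_pos (by omega), if_neg (by omega)])
        | (rw [if_neg (by omega), if_pos (by omega)])
        | omega
  rw [hk0]
  exact foldl_shift pieces x y _ hnb

-- main induction: with enough fuel, A's walk lands on B's closed form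
theorem fuel_main (pieces : List (Int × Int)) (n : Nat) :
    ∀ x y : Int, (1 ≤ x ∨ 1 ≤ y) → (slideSteps pieces x y).toNat < n →
      moveBotLeftFuel pieces n (x, y) = move_bot_left_alt pieces (x, y) := by
  induction n with
  | zero => intro x y _ hlt; omega
  | succ n ih =>
    intro x y hpre hlt
    by_cases hstop : x = 1 ∨ y = 1 ∨ (x - 1, y - 1) ∈ pieces
    · have hk : slideSteps pieces x y = 0 :=
        (slideSteps_eq_zero_iff pieces x y hpre).mpr hstop
      have halt : move_bot_left_alt pieces (x, y) = (x, y) := by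
        simp [move_bot_left_alt, hk]
      rw [halt]
      simp only [moveBotLeftFuel]
      rcases hstop with h | h | h
      · rw [if_pos (Or.inl h)]
      · rw [if_pos (Or.inr h)]
      · by_cases h1 : x = 1 ∨ y = 1
        · rw [if_pos h1]
        · rw [if_neg h1, if_pos h]
    · push Not at hstop
      obtain ⟨hx, hy, hnb⟩ := hstop
      have hk0 : slideSteps pieces x y ≠ 0 := by
        intro h0
        rcases (slideSteps_eq_zero_iff pieces x y hpre).mp h0 with h | h | h
        · exact hx h
        · exact hy h
        · exact hnb h
      have hpre' : (1:Int) ≤ x - 1 ∨ (1:Int) ≤ y - 1 := by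
        rcases hpre with h | h <;> [left; right] <;> omega
      have hstep := slideSteps_step pieces x y hpre hx hy hnb
      have hnn := slideSteps_nonneg pieces x y hpre
      have hlt' : (slideSteps pieces (x - 1) (y - 1)).toNat < n := by
        rw [hstep]; omega
      have hA : moveBotLeftFuel pieces (n + 1) (x, y) =
          moveBotLeftFuel pieces n (x - 1, y - 1) := by
        simp only [moveBotLeftFuel]
        rw [if_neg (by simp [hx, hy]), if_neg hnb]
      rw [hA, ih (x - 1) (y - 1) hpre' hlt']
      have hk' : slideSteps pieces (x - 1) (y - 1) = slideSteps pieces x y - 1 := hstep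
      simp only [move_bot_left_alt, hk']
      by_cases hone : slideSteps pieces x y - 1 = 0
      · rw [if_pos hone, if_neg hk0]
        have : slideSteps pieces x y = 1 := by omega
        rw [this]
      · rw [if_neg hone, if_neg hk0]
        simp only [Prod.mk.injEq]
        constructor <;> ring

-- ===== VERDICT (by name: the statement is the Claim_ definition above) =====
theorem move_bot_left_spec : Claim_equal_move_bot_left := by
  intro pieces piece _ hpre
  unfold Spec_move_bot_left move_bot_left
  obtain ⟨x, y⟩ := piece
  have hpre' : (1:Int) ≤ x ∨ (1:Int) ≤ y := hpre
  have hfuel : (slideSteps pieces x y).toNat < x.natAbs + y.natAbs + 1 := by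
    have hnn := slideSteps_nonneg pieces x y hpre'
    rcases hpre' with h | h
    · have := slideSteps_le_x pieces x y h; omega
    · have := slideSteps_le_y pieces x y h; omega
  exact fuel_main pieces (x.natAbs + y.natAbs + 1) x y hpre' hfuel
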